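-- pv_equiv track=rewrite | github.com/sskong777/Algorithm_Study | Baekjoon/프로젝트/응애EASY_홍진욱.py | count_greeting_members
-- ===== SOURCE A (Python) =====
-- def count_greeting_members(N, M, K, greetings):
--     members = [0] * N
--     for i in greetings:
--         members[i] = 1
--
--     for _ in range(K):
--         temp = members[:]
--         for i in range(N):
--             if temp[i] == 1:
--                 if temp[i-1] == 1 and temp[(i+1)%N] == 1:
--                     members[i] = 0
--                 elif temp[i-1] == 1 or temp[(i+1)%N] == 1:
--                     members[i] = 1
--                 else:
--                     members[i] = 0
--             else:
--                 if temp[i-1] == 1 and temp[(i+1)%N] == 1: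
--                     members[i] = 1
--     return members.count(1)
-- ===== SOURCE B (Python) =====
-- def count_greeting_members(N, M, K, greetings):
--     # ring as an N-bit integer; one bitwise step advances all cells at once
--     s = 0
--     for i in greetings:
--         s |= 1 << (i % N)
--     mask = (1 << N) - 1
--     for _ in range(K):
--         left = ((s << 1) | (s >> (N - 1))) & mask
--         right = ((s >> 1) | (s << (N - 1))) & mask
--         s = ((left & s) | (s & right) | (left & right)) & (mask ^ (left & s & right))
--     return s.bit_count()
-- ===== Notes on version B (the rewrite author's own statement) =====
-- stated objective: faster
-- what changed: The per-cell inner loop over a copied list is replaced by word-parallel bitwise arithmetic on one N-bit integer: rotations give left/right neighbours and one boolean formula ('exactly two of left,self,right alive') updates all cells per step.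
-- outside the precondition, e.g. on count_greeting_members(0, 0, 1, []): A returns 0, B raises ValueError
import Mathlib
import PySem

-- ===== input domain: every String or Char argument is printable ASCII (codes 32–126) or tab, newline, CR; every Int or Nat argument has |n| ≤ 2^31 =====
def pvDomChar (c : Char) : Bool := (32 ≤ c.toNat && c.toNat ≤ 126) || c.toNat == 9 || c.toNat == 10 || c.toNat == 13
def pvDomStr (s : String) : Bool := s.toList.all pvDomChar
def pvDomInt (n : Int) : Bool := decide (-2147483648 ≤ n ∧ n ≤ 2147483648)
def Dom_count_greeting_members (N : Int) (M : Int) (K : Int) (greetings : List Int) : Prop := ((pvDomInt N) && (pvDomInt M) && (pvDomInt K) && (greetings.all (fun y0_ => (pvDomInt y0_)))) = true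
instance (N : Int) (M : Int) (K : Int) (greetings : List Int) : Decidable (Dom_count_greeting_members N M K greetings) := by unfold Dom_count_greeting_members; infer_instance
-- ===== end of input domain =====

-- B advances the whole ring in O(1) big-int bitwise steps instead of A's per-cell inner loop.

-- ===== PORT A =====
-- one pass of A's inner 'for i in range(N)' loop: temp is the snapshot, m the list being written
def astep (N : Int) (members : List Int) : List Int :=
  let temp := members
  (PySem.List.pyRange 0 N 1).foldl (fun m i =>
    if PySem.List.pyGetD temp i 0 = 1 then
      if PySem.List.pyGetD temp (i - 1) 0 = 1 ∧ PySem.List.pyGetD temp (PySem.Int.mod (i + 1) N) 0 = 1 then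
        PySem.List.pySetD m i 0
      else if PySem.List.pyGetD temp (i - 1) 0 = 1 ∨ PySem.List.pyGetD temp (PySem.Int.mod (i + 1) N) 0 = 1 then
        PySem.List.pySetD m i 1
      else
        PySem.List.pySetD m i 0
    else
      if PySem.List.pyGetD temp (i - 1) 0 = 1 ∧ PySem.List.pyGetD temp (PySem.Int.mod (i + 1) N) 0 = 1 then
        PySem.List.pySetD m i 1
      else m) members

def count_greeting_members (N : Int) (M : Int) (K : Int) (greetings : List Int) : Int :=
  ((PySem.List.count
      ((PySem.List.pyRange 0 K 1).foldl (fun m _ => astep N m)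
        (greetings.foldl (fun m i => PySem.List.pySetD m i 1) (List.replicate N.toNat (0 : Int)))) 1 : Nat) : Int)

-- ===== PORT B =====
-- one bitwise step of Source B's loop; shift amounts N-1 and i % N are nonnegative under Pre_ (1 ≤ N), so .toNat is exact
def bstep (N : Int) (s : Int) : Int :=
  let mask := ((1 : Int) <<< N.toNat) - 1
  let left := PySem.Int.band (PySem.Int.bor (s <<< (1 : Nat)) (s >>> (N - 1).toNat)) mask
  let right := PySem.Int.band (PySem.Int.bor (s >>> (1 : Nat)) (s <<< (N - 1).toNat)) mask
  PySem.Int.band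
    (PySem.Int.bor (PySem.Int.bor (PySem.Int.band left s) (PySem.Int.band s right)) (PySem.Int.band left right))
    (PySem.Int.bxor mask (PySem.Int.band (PySem.Int.band left s) right))

def count_greeting_members_alt (N : Int) (M : Int) (K : Int) (greetings : List Int) : Int :=
  ((PySem.Int.bitCount
      ((PySem.List.pyRange 0 K 1).foldl (fun s _ => bstep N s)
        (greetings.foldl (fun s i => PySem.Int.bor s ((1 : Int) <<< (PySem.Int.mod i N).toNat)) (0 : Int))) : Nat) : Int)

-- ===== PRECONDITION & SPEC =====
-- Pre_ excludes greeting indices outside [-N, N) (A raises IndexError there) and the degenerate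
-- empty ring N ≤ 0, on which A returns 0 only for empty greetings while B's bit-shift construction
-- raises ValueError (negative shift count); see the cite in claim.json.
def Pre_count_greeting_members (N : Int) (M : Int) (K : Int) (greetings : List Int) : Prop :=
  1 ≤ N ∧ ∀ i ∈ greetings, -N ≤ i ∧ i < N
instance (N : Int) (M : Int) (K : Int) (greetings : List Int) : Decidable (Pre_count_greeting_members N M K greetings) := by
  unfold Pre_count_greeting_members; infer_instance

def pvWitness_count_greeting_members : Int × Int × Int × List Int := (3, 0, 2, [0, 2])

def Spec_count_greeting_members (N : Int) (M : Int) (K : Int) (greetings : List Int) (out : Int) : Prop := out = count_greeting_members_alt N M K greetings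
instance (N : Int) (M : Int) (K : Int) (greetings : List Int) (out : Int) : Decidable (Spec_count_greeting_members N M K greetings out) := by unfold Spec_count_greeting_members; infer_instance

-- ===== CLAIM (what is proved, stated in full; the proofs are below) =====
def Claim_equal_count_greeting_members : Prop := ∀ (N : Int) (M : Int) (K : Int) (greetings : List Int), Dom_count_greeting_members N M K greetings → Pre_count_greeting_members N M K greetings → Spec_count_greeting_members N M K greetings (count_greeting_members N M K greetings)

-- ===== LEMMAS AND PROOFS =====

-- the cell update rule of A, written as a function of (left, self, right)
def ruleVal (l c r : Int) : Int :=
  if c = 1 then (if l = 1 ∧ r = 1 then 0 else if l = 1 ∨ r = 1 then 1 else 0)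
  else (if l = 1 ∧ r = 1 then 1 else c)

-- B's bitwise step, mirrored on Nat
def natStep (n t : Nat) : Nat :=
  ((((t <<< 1) ||| (t >>> (n - 1))) &&& (2 ^ n - 1)) &&& t
      ||| t &&& (((t >>> 1) ||| (t <<< (n - 1))) &&& (2 ^ n - 1))
      ||| (((t <<< 1) ||| (t >>> (n - 1))) &&& (2 ^ n - 1)) &&& (((t >>> 1) ||| (t <<< (n - 1))) &&& (2 ^ n - 1)))
    &&& ((2 ^ n - 1) ^^^ (((t <<< 1) ||| (t >>> (n - 1))) &&& (2 ^ n - 1)) &&& t &&& (((t >>> 1) ||| (t <<< (n - 1))) &&& (2 ^ n - 1)))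

-- 'exactly two of three alive'
def exact2 (l c r : Bool) : Bool := (l && c || c && r || l && r) && !(l && c && r)

def natInitStep (n : Nat) (t : Nat) (i : Int) : Nat := t ||| 1 <<< (PySem.Int.mod i (n : Int)).toNat

-- invariant: m is the list view, t the bit view of the ring
def RInv (n t : Nat) (m : List Int) : Prop :=
  m.length = n ∧ t < 2 ^ n ∧ ∀ j < n, m.getD j 0 = (if t.testBit j then 1 else 0)

lemma pySetD_neg {α : Type} (m : List α) (i : Int) (v : α) (h1 : -(m.length : Int) ≤ i) (h2 : i < 0) :
    PySem.List.pySetD m i v = m.set ((m.length : Int) + i).toNat v := by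
  simp only [PySem.List.pySetD, PySem.List.pySet?, PySem.List.pyIdx?]
  rw [if_neg (by omega), if_pos (by omega)]
  simp only [Option.map_some, Option.getD_some]
  congr 1; omega

lemma testBit_big {n t : Nat} (ht : t < 2 ^ n) {k : Nat} (hk : n ≤ k) : t.testBit k = false :=
  Nat.testBit_lt_two_pow (lt_of_lt_of_le ht (Nat.pow_le_pow_right (by norm_num) hk))

lemma left_testBit (n t j : Nat) (hn : 1 ≤ n) (ht : t < 2 ^ n) (hj : j < n) :
    (((t <<< 1) ||| (t >>> (n - 1))) &&& (2 ^ n - 1)).testBit j = t.testBit ((j + n - 1) % n) := by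
  simp only [Nat.testBit_and, Nat.testBit_or, Nat.testBit_shiftLeft, Nat.testBit_shiftRight,
    Nat.testBit_two_pow_sub_one, hj, decide_true, Bool.and_true]
  rcases Nat.eq_zero_or_pos j with rfl | hjpos
  · have h1 : (0 + n - 1) % n = n - 1 := by
      rw [show 0 + n - 1 = n - 1 by omega]; exact Nat.mod_eq_of_lt (by omega)
    simp [show n - 1 + 0 = n - 1 by omega]
  · have h2 : (j + n - 1) % n = j - 1 := by
      rw [show j + n - 1 = (j - 1) + n by omega, Nat.add_mod_right]
      exact Nat.mod_eq_of_lt (by omega)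
    have h3 : t.testBit (n - 1 + j) = false := testBit_big ht (by omega)
    simp [h2, h3, show (1:Nat) ≤ j from hjpos]

lemma right_testBit (n t j : Nat) (hn : 1 ≤ n) (ht : t < 2 ^ n) (hj : j < n) :
    (((t >>> 1) ||| (t <<< (n - 1))) &&& (2 ^ n - 1)).testBit j = t.testBit ((j + 1) % n) := by
  simp only [Nat.testBit_and, Nat.testBit_or, Nat.testBit_shiftLeft, Nat.testBit_shiftRight,
    Nat.testBit_two_pow_sub_one, hj, decide_true, Bool.and_true]
  by_cases hj1 : j = n - 1
  · subst hj1
    have h1 : (n - 1 + 1) % n = 0 := by rw [show n - 1 + 1 = n by omega]; exact Nat.mod_self n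
    have h2 : t.testBit (1 + (n - 1)) = false := testBit_big ht (by omega)
    simp [h1, h2]
  · have h1 : (j + 1) % n = j + 1 := Nat.mod_eq_of_lt (by omega)
    have h2 : ¬ (n - 1 ≤ j) := by omega
    simp [h1, h2, Nat.add_comm 1 j]

lemma natStep_lt (n t : Nat) (hn : 1 ≤ n) (ht : t < 2 ^ n) : natStep n t < 2 ^ n := by
  have hmask : 2 ^ n - 1 < 2 ^ n := by have := Nat.two_pow_pos n; omega
  exact lt_of_le_of_lt Nat.and_le_right
    (Nat.xor_lt_two_pow hmask
      (lt_of_le_of_lt Nat.and_le_right (lt_of_le_of_lt Nat.and_le_right hmask)))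

lemma natStep_testBit (n t j : Nat) (hn : 1 ≤ n) (ht : t < 2 ^ n) (hj : j < n) :
    (natStep n t).testBit j
      = exact2 (t.testBit ((j + n - 1) % n)) (t.testBit j) (t.testBit ((j + 1) % n)) := by
  unfold natStep
  rw [← left_testBit n t j hn ht hj, ← right_testBit n t j hn ht hj]
  set L := ((t <<< 1) ||| (t >>> (n - 1))) &&& (2 ^ n - 1) with hLdef
  set R := ((t >>> 1) ||| (t <<< (n - 1))) &&& (2 ^ n - 1) with hRdef
  simp only [exact2, Nat.testBit_and, Nat.testBit_or, Nat.testBit_xor,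
    Nat.testBit_two_pow_sub_one, hj, decide_true]
  rcases hA : L.testBit j <;> rcases hB : t.testBit j <;> rcases hC : R.testBit j <;>
    simp [hA, hB, hC]

lemma bstep_cast (n : Nat) (hn : 1 ≤ n) (t : Nat) : bstep ↑n ↑t = ↑(natStep n t) := by
  have h1 : ((n : Int) - 1).toNat = n - 1 := by omega
  have hsl : ∀ (a k : Nat), ((a : Nat) : Int) <<< k = ((a <<< k : Nat) : Int) := by
    intro a k; push_cast; rfl
  have hsr : ∀ (a k : Nat), ((a : Nat) : Int) >>> k = ((a >>> k : Nat) : Int) := by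
    intro a k; push_cast; rfl
  have hmask : ((1 : Int) <<< n) - 1 = ((2 ^ n - 1 : Nat) : Int) := by
    have h2 : 1 ≤ 2 ^ n := Nat.one_le_two_pow
    rw [show ((1 : Int)) = ((1 : Nat) : Int) from rfl, hsl, Nat.one_shiftLeft]
    omega
  unfold bstep natStep
  simp only [Int.toNat_natCast, h1, hmask, hsl, hsr, PySem.Int.band_natCast,
    PySem.Int.bor_natCast, PySem.Int.bxor_natCast]

-- partial result of A's inner loop: first i cells updated, the rest still the snapshot
def mixA (m : List Int) (n i : Nat) : List Int :=
  (List.range n).map (fun j =>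
    if j < i then ruleVal (m.getD ((j + n - 1) % n) 0) (m.getD j 0) (m.getD ((j + 1) % n) 0)
    else m.getD j 0)

lemma mixA_succ (m : List Int) (n i : Nat) (hi : i < n) :
    (mixA m n i).set i
        (ruleVal (m.getD ((i + n - 1) % n) 0) (m.getD i 0) (m.getD ((i + 1) % n) 0))
      = mixA m n (i + 1) := by
  apply List.ext_getElem (by simp [mixA])
  intro j h1 h2
  simp only [mixA, List.getElem_set, List.getElem_map, List.getElem_range]
  have hjn : j < n := by simpa [mixA] using h2
  rcases eq_or_ne i j with rfl | hne
  · simp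
  · rw [if_neg hne]
    by_cases hj : j < i
    · simp [hj, show j < i + 1 by omega]
    · simp [hj, show ¬ (j < i + 1) by omega]

lemma mixA_set_self (m : List Int) (n i : Nat) :
    (mixA m n i).set i (m.getD i 0) = mixA m n i := by
  rcases Nat.lt_or_ge i n with hi | hi
  · apply List.ext_getElem (by simp)
    intro j h1 h2
    simp only [mixA, List.getElem_set, List.getElem_map, List.getElem_range]
    rcases eq_or_ne i j with rfl | hne
    · simp
    · rw [if_neg hne]
  · have hl2 : (mixA m n i).length ≤ i := by simp [mixA]; omega
    exact List.set_eq_of_length_le hl2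

lemma astep_eq (n : Nat) (hn : 1 ≤ n) (m : List Int) (hm : m.length = n) :
    astep ↑n m = mixA m n n := by
  unfold astep
  rw [PySem.List.pyRange_zero_nat n, List.foldl_map]
  suffices H : ∀ i, i ≤ n →
      (List.range i).foldl (fun m' (k : Nat) =>
        if PySem.List.pyGetD m ↑k 0 = 1 then
          if PySem.List.pyGetD m (↑k - 1) 0 = 1 ∧ PySem.List.pyGetD m (PySem.Int.mod (↑k + 1) ↑n) 0 = 1 then
            PySem.List.pySetD m' ↑k 0
          else if PySem.List.pyGetD m (↑k - 1) 0 = 1 ∨ PySem.List.pyGetD m (PySem.Int.mod (↑k + 1) ↑n) 0 = 1 then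
            PySem.List.pySetD m' ↑k 1
          else
            PySem.List.pySetD m' ↑k 0
        else
          if PySem.List.pyGetD m (↑k - 1) 0 = 1 ∧ PySem.List.pyGetD m (PySem.Int.mod (↑k + 1) ↑n) 0 = 1 then
            PySem.List.pySetD m' ↑k 1
          else m') m = mixA m n i from H n le_rfl
  intro i hi
  induction i with
  | zero =>
    apply List.ext_getElem (by simp [mixA, hm])
    intro j h1 h2
    simp only [List.range_zero, List.foldl_nil] at h1 ⊢
    simp only [mixA, List.getElem_map, List.getElem_range]
    exact (List.getD_eq_getElem m 0 h1).symm
  | succ i ih =>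
    rw [List.range_succ, List.foldl_append, ih (by omega), List.foldl_cons, List.foldl_nil]
    have hin : i < n := by omega
    have hc : PySem.List.pyGetD m (↑i) 0 = m.getD i 0 := PySem.List.pyGetD_natCast m i 0
    have hl : PySem.List.pyGetD m (↑i - 1) 0 = m.getD ((i + n - 1) % n) 0 := by
      rcases Nat.eq_zero_or_pos i with rfl | hipos
      · have hne : m ≠ [] := by intro h; rw [h] at hm; simp at hm; omega
        rw [show ((0 : Nat) : Int) - 1 = -1 by norm_num, PySem.List.pyGetD_neg_one m 0 hne,
          List.getLast_eq_getElem]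
        have hmod : (0 + n - 1) % n = n - 1 := by
          rw [show 0 + n - 1 = n - 1 by omega]; exact Nat.mod_eq_of_lt (by omega)
        rw [hmod, List.getD_eq_getElem m 0 (by omega)]
        congr 1; omega
      · have hcast : ((i : Nat) : Int) - 1 = ((i - 1 : Nat) : Int) := by omega
        rw [hcast, PySem.List.pyGetD_natCast]
        have hmod : (i + n - 1) % n = i - 1 := by
          rw [show i + n - 1 = (i - 1) + n by omega, Nat.add_mod_right]
          exact Nat.mod_eq_of_lt (by omega)
        rw [hmod]
    have hr : PySem.List.pyGetD m (PySem.Int.mod (↑i + 1) ↑n) 0 = m.getD ((i + 1) % n) 0 := by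
      rw [show ((i : Nat) : Int) + 1 = ((i + 1 : Nat) : Int) by push_cast; ring,
        PySem.Int.mod_natCast, PySem.List.pyGetD_natCast]
    rw [hc, hl, hr]
    simp only [PySem.List.pySetD_natCast]
    split_ifs with h1 h2 h3 h4
    · rw [← mixA_succ m n i hin]; congr 1
      simp only [ruleVal]; rw [if_pos h1, if_pos h2]
    · rw [← mixA_succ m n i hin]; congr 1
      simp only [ruleVal]; rw [if_pos h1, if_neg h2, if_pos h3]
    · rw [← mixA_succ m n i hin]; congr 1
      simp only [ruleVal]; rw [if_pos h1, if_neg h2, if_neg h3]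
    · rw [← mixA_succ m n i hin]; congr 1
      simp only [ruleVal]; rw [if_neg h1, if_pos h4]
    · rw [← mixA_succ m n i hin,
        show ruleVal (m.getD ((i + n - 1) % n) 0) (m.getD i 0) (m.getD ((i + 1) % n) 0)
            = m.getD i 0 from by simp only [ruleVal]; rw [if_neg h1, if_neg h4],
        mixA_set_self]

lemma step_inv (n t : Nat) (m : List Int) (hn : 1 ≤ n) (h : RInv n t m) :
    RInv n (natStep n t) (astep ↑n m) := by
  obtain ⟨hlen, ht, hbit⟩ := h
  rw [astep_eq n hn m hlen]
  refine ⟨by simp [mixA], natStep_lt n t hn ht, ?_⟩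
  intro j hj
  have hg : (mixA m n n).getD j 0
      = ruleVal (m.getD ((j + n - 1) % n) 0) (m.getD j 0) (m.getD ((j + 1) % n) 0) := by
    rw [List.getD_eq_getElem _ 0 (by simp [mixA]; omega)]
    simp [mixA, hj]
  rw [hg, hbit j hj, hbit _ (Nat.mod_lt _ (by omega)), hbit _ (Nat.mod_lt _ (by omega)),
    natStep_testBit n t j hn ht hj]
  cases t.testBit ((j + n - 1) % n) <;> cases t.testBit j <;> cases t.testBit ((j + 1) % n) <;>
    simp [ruleVal, exact2]

lemma set_inv (n t : Nat) (m : List Int) (i : Int) (hn : 1 ≤ n)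
    (hi1 : -(n : Int) ≤ i) (hi2 : i < (n : Int)) (h : RInv n t m) :
    RInv n (natInitStep n t i) (PySem.List.pySetD m i 1) := by
  obtain ⟨hlen, ht, hbit⟩ := h
  have hnpos : (0 : Int) < (n : Int) := by omega
  have hmod : PySem.Int.mod i ↑n = (if 0 ≤ i then i else i + n) := by
    rw [PySem.Int.mod_eq_emod_of_pos hnpos]
    split_ifs with h0
    · exact Int.emod_eq_of_lt h0 hi2
    · have h3 : (i + (n : Int)) % (n : Int) = i % (n : Int) := by
        rw [show i + (n : Int) = i + (n : Int) * 1 by ring]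
        exact Int.add_mul_emod_self_left i (n : Int) 1
      rw [← h3]
      exact Int.emod_eq_of_lt (by omega) (by omega)
  set k := (PySem.Int.mod i ↑n).toNat with hk
  have hkn : k < n := by rw [hk, hmod]; split_ifs <;> omega
  have hset : PySem.List.pySetD m i 1 = m.set k 1 := by
    rcases le_or_gt 0 i with h0 | h0
    · rw [PySem.List.pySetD_of_nonneg m 1 h0]
      congr 1; rw [hk, hmod, if_pos h0]
    · rw [pySetD_neg m i 1 (by omega) h0]
      congr 1; rw [hk, hmod, if_neg (by omega)]; omega
  refine ⟨by simp [hset, hlen], ?_, ?_⟩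
  · exact Nat.or_lt_two_pow ht
      (by rw [Nat.one_shiftLeft]; exact Nat.pow_lt_pow_right (by norm_num) hkn)
  · intro j hj
    rw [hset]
    have hgd : (m.set k 1).getD j 0 = if k = j then 1 else m.getD j 0 := by
      rw [List.getD_eq_getElem _ _ (by simp [hlen]; omega), List.getElem_set]
      split_ifs with hkj
      · rfl
      · exact (List.getD_eq_getElem _ _ (by omega)).symm
    rw [hgd]
    simp only [natInitStep, ← hk, Nat.testBit_or, Nat.one_shiftLeft, Nat.testBit_two_pow]
    rcases eq_or_ne k j with rfl | hne
    · simp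
    · rw [if_neg hne, hbit j hj]
      simp [hne]

lemma init_inv (n : Nat) (hn : 1 ≤ n) (g : List Int) (hg : ∀ i ∈ g, -(n : Int) ≤ i ∧ i < n) :
    ∀ (t : Nat) (m : List Int), RInv n t m →
      RInv n (g.foldl (natInitStep n) t) (g.foldl (fun m i => PySem.List.pySetD m i 1) m) := by
  induction g with
  | nil => intro t m h; exact h
  | cons i g ih =>
    intro t m h
    exact ih (fun x hx => hg x (List.mem_cons_of_mem _ hx)) _ _
      (set_inv n t m i hn (hg i (List.mem_cons_self)).1 (hg i (List.mem_cons_self)).2 h)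

lemma init_cast (n : Nat) (g : List Int) (t : Nat) :
    g.foldl (fun s i => PySem.Int.bor s ((1 : Int) <<< (PySem.Int.mod i ↑n).toNat)) ((t : Nat) : Int)
      = ↑(g.foldl (natInitStep n) t) := by
  induction g generalizing t with
  | nil => rfl
  | cons i g ih =>
    simp only [List.foldl_cons]
    rw [show (1 : Int) <<< (PySem.Int.mod i ↑n).toNat
        = (((1 <<< (PySem.Int.mod i ↑n).toNat : Nat)) : Int) from by push_cast; rfl,
      PySem.Int.bor_natCast]
    exact ih _

lemma loop_inv (n : Nat) (hn : 1 ≤ n) (l : List Int) :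
    ∀ (t : Nat) (m : List Int), RInv n t m →
      RInv n (l.foldl (fun t _ => natStep n t) t) (l.foldl (fun m _ => astep ↑n m) m) := by
  intro t m h
  induction l generalizing t m with
  | nil => exact h
  | cons x xs ih => exact ih _ _ (step_inv n t m hn h)

lemma loop_cast (n : Nat) (hn : 1 ≤ n) (l : List Int) :
    ∀ (t : Nat), l.foldl (fun s _ => bstep ↑n s) ((t : Nat) : Int)
      = ↑(l.foldl (fun t _ => natStep n t) t) := by
  intro t
  induction l generalizing t with
  | nil => rfl
  | cons x xs ih => simpa [bstep_cast n hn t] using ih (natStep n t)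

lemma count_map_ite (l : List Nat) (p : Nat → Bool) :
    PySem.List.count (l.map fun j => if p j then (1 : Int) else 0) 1 = l.countP p := by
  induction l with
  | nil => rfl
  | cons j l ih =>
    simp only [List.map_cons, PySem.List.count, List.count_cons, List.countP_cons] at *
    by_cases h : p j <;> simp [h, ih]

lemma bitCount_countP (n : Nat) : ∀ t : Nat, t < 2 ^ n →
    PySem.Int.bitCount ↑t = (List.range n).countP (fun j => t.testBit j) := by
  induction n with
  | zero =>
    intro t ht
    interval_cases t
    simp [PySem.Int.bitCount_zero]
  | succ n ih =>
    intro t ht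
    rcases Nat.eq_zero_or_pos t with rfl | htpos
    · simp [PySem.Int.bitCount_zero, Nat.zero_testBit]
    · have hpow : 2 ^ (n + 1) = 2 * 2 ^ n := by ring
      rw [PySem.Int.bitCount_natCast htpos, ih (t / 2) (by omega),
        List.range_succ_eq_map, List.countP_cons, List.countP_map]
      have hcomp : ((fun j => t.testBit j) ∘ Nat.succ) = fun j => (t / 2).testBit j := by
        funext j; simp [Function.comp, Nat.testBit_succ]
      have hb : (if t.testBit 0 then 1 else 0) = t % 2 := by
        rw [Nat.testBit_zero]
        rcases Nat.mod_two_eq_zero_or_one t with h | h <;> simp [h]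
      rw [hcomp]
      omega

lemma count_of_inv (n t : Nat) (m : List Int) (h : RInv n t m) :
    PySem.List.count m 1 = PySem.Int.bitCount ↑t := by
  obtain ⟨hlen, ht, hbit⟩ := h
  have hm : m = (List.range n).map (fun j => if t.testBit j then (1 : Int) else 0) := by
    apply List.ext_getElem (by simp [hlen])
    intro j h1 h2
    simp only [List.getElem_map, List.getElem_range]
    rw [← List.getD_eq_getElem m 0 h1]
    exact hbit j (by omega)
  rw [hm, count_map_ite, bitCount_countP n t ht]

-- ===== VERDICT (by name: the statement is the Claim_ definition above) =====
theorem count_greeting_members_spec : Claim_equal_count_greeting_members := by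
  intro N M K greetings _ hpre
  obtain ⟨hN, hg⟩ := hpre
  have hNn : N = ((N.toNat : Nat) : Int) := by omega
  set n := N.toNat with hn
  have hn1 : 1 ≤ n := by omega
  have hg' : ∀ i ∈ greetings, -(n : Int) ≤ i ∧ i < (n : Int) := by rw [← hNn]; exact hg
  have h0 : RInv n 0 (List.replicate n (0 : Int)) :=
    ⟨by simp, Nat.two_pow_pos n, by intro j hj; simp⟩
  have hIni := init_inv n hn1 greetings hg' 0 _ h0
  have hK := loop_inv n hn1 (PySem.List.pyRange 0 K 1) _ _ hIni
  unfold Spec_count_greeting_members count_greeting_members count_greeting_members_alt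
  rw [hNn]
  rw [show ((0:Int)) = ((0:Nat):Int) from rfl, init_cast n greetings 0, loop_cast n hn1]
  exact_mod_cast count_of_inv n _ _ hK
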